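-- pv_equiv track=rewrite | github.com/badumbatish/g4bl_suite | src/g4blplot/g4blplot.py | construct_list_files
-- ===== SOURCE A (Python) =====
-- def construct_list_files(filtered_arg_list: list, postfix_string_list=None):
--     """
--     Constructs a list (1) of lists (2) of lists (3), where lists (3) represents the files
--         that a batch outputs, lists (2) represents each command to the terminal.
--     This function essentially constructs a list of files from the argument list generated by generate_args()
--         and filtered via filter_args()
--     Check tests/unit_test/test_remembrance.py -> test_construct_list_files()
--     """
--     # Constructor list file
--
--     # if there is postfix_string_list, add to every filtered_arg_list
--
--     # Append .txt in the end
--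
--     result = []
--     for lst in filtered_arg_list:
--         task_output_list = []
--         std_config = ""
--         for item in lst:
--             std_config = std_config + item.replace("=", "")
--             std_config += "|"
--         std_config = std_config[: len(std_config) - 1]
--
--         if postfix_string_list is None:
--             task_output_list.append(std_config)
--         else:
--             for item in postfix_string_list:
--                 task_output_list.append(std_config + f"|{item}")
--         result.append(task_output_list)
--
--     def recursively_add_txt(temp_lst: list):
--         res = []
--         for temp_item in temp_lst:
--             if isinstance(temp_item, list):
--                 res.append(recursively_add_txt(temp_item))
--             else:
--                 res.append(temp_item + ".txt")
--         return res
--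
--     result = recursively_add_txt(result)
--     return result
-- ===== SOURCE B (Python) =====
-- def construct_list_files(filtered_arg_list: list, postfix_string_list=None):
--     result = []
--     for lst in filtered_arg_list:
--         std_config = "|".join(item.replace("=", "") for item in lst)
--         if postfix_string_list is None:
--             result.append([std_config + ".txt"])
--         else:
--             result.append([std_config + f"|{item}.txt" for item in postfix_string_list])
--     return result
-- ===== Notes on version B (the rewrite author's own statement) =====
-- stated objective: simpler
-- what changed: B builds each row in a single pass using '|'.join over the '='-stripped items and appends '.txt' at construction time, eliminating A's manual concat-then-truncate separator handling and its entire separate recursive relabel pass (recursively_add_txt).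
import Mathlib
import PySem

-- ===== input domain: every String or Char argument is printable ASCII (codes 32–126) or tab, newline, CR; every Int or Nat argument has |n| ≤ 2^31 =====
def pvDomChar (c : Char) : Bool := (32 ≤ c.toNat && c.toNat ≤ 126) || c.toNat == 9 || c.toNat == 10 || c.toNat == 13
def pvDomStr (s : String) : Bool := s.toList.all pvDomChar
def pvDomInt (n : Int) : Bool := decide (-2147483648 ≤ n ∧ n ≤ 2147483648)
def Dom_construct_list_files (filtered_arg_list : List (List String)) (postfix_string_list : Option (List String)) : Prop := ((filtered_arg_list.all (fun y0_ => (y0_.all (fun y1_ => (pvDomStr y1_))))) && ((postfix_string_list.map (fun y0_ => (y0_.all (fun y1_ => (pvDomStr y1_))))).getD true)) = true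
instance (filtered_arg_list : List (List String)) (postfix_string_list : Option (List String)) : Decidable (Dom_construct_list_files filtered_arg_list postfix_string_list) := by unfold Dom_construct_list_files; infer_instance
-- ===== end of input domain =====

-- B builds each row in one pass ('|'.join of '='-stripped items, '.txt' appended at construction),
-- removing A's concat-then-truncate separator handling and its separate recursive '.txt' pass (simpler).


-- ===== PORT A =====
-- std_config loop of A for one inner list, then the slice std_config[: len(std_config) - 1]
def clfA_std (lst : List String) : String :=
  let std_config := lst.foldl (fun std_config item =>
    (std_config ++ PySem.Str.replace item "=" "") ++ "|") ""
  PySem.Str.slice std_config none (some (PySem.Str.len std_config - 1))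

-- the inner recursion of recursively_add_txt (elements are strings here)
def clfA_addTxtInner : List String → List String
  | [] => []
  | temp_item :: rest => (temp_item ++ ".txt") :: clfA_addTxtInner rest

-- recursively_add_txt on the (one-level-nested) result list
def clfA_addTxtOuter : List (List String) → List (List String)
  | [] => []
  | temp_item :: rest => clfA_addTxtInner temp_item :: clfA_addTxtOuter rest

def construct_list_files (filtered_arg_list : List (List String)) (postfix_string_list : Option (List String)) : List (List String) :=
  let result := filtered_arg_list.foldl (fun result lst =>
    let std_config := clfA_std lst
    let task_output_list : List String :=
      match postfix_string_list with
      | none => [std_config]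
      | some ps => ps.foldl (fun task_output_list item =>
          task_output_list ++ [std_config ++ "|" ++ item]) []
    result ++ [task_output_list]) []
  clfA_addTxtOuter result

-- ===== PORT B =====
def construct_list_files_alt (filtered_arg_list : List (List String)) (postfix_string_list : Option (List String)) : List (List String) :=
  filtered_arg_list.foldl (fun result lst =>
    let std_config := PySem.Str.join "|" (lst.map (fun item => PySem.Str.replace item "=" ""))
    let row : List String :=
      match postfix_string_list with
      | none => [std_config ++ ".txt"]
      | some ps => ps.map (fun item => std_config ++ "|" ++ item ++ ".txt")
    result ++ [row]) []

-- ===== PRECONDITION & SPEC =====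
def Spec_construct_list_files (filtered_arg_list : List (List String)) (postfix_string_list : Option (List String)) (out : List (List String)) : Prop := out = construct_list_files_alt filtered_arg_list postfix_string_list
instance (filtered_arg_list : List (List String)) (postfix_string_list : Option (List String)) (out : List (List String)) : Decidable (Spec_construct_list_files filtered_arg_list postfix_string_list out) := by unfold Spec_construct_list_files; infer_instance

-- ===== CLAIM (what is proved, stated in full; the proofs are below) =====
def Claim_equal_construct_list_files : Prop := ∀ (filtered_arg_list : List (List String)) (postfix_string_list : Option (List String)), Dom_construct_list_files filtered_arg_list postfix_string_list → Spec_construct_list_files filtered_arg_list postfix_string_list (construct_list_files filtered_arg_list postfix_string_list)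

-- ===== LEMMAS AND PROOFS =====

-- B's std_config for one inner list
def clfB_std (lst : List String) : String :=
  PySem.Str.join "|" (lst.map (fun item => PySem.Str.replace item "=" ""))

-- the row A builds before the .txt pass / the row B builds directly
def clfA_row (psl : Option (List String)) (lst : List String) : List String :=
  match psl with
  | none => [clfA_std lst]
  | some ps => ps.foldl (fun t item => t ++ [clfA_std lst ++ "|" ++ item]) []

def clfB_row (psl : Option (List String)) (lst : List String) : List String :=
  match psl with
  | none => [clfB_std lst ++ ".txt"]
  | some ps => ps.map (fun item => clfB_std lst ++ "|" ++ item ++ ".txt")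

-- the char-level value of A's foldl (before the slice): every piece followed by '|'
lemma clfA_foldl_chars (lst : List String) (acc : String) :
    (lst.foldl (fun std_config item => (std_config ++ PySem.Str.replace item "=" "") ++ "|") acc).toList
    = acc.toList ++ (lst.map (fun item => (PySem.Str.replace item "=" "").toList ++ ['|'])).flatten := by
  induction lst generalizing acc with
  | nil => simp
  | cons x xs ih => simp [List.foldl_cons, ih]

-- join with '|' followed by a trailing '|' is exactly the flatten of pieces-plus-bar (nonempty case)
lemma join_bar_append (ps : List (List Char)) (hps : ps ≠ []) :
    PySem.Chars.join ['|'] ps ++ ['|'] = (ps.map (fun p => p ++ ['|'])).flatten := by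
  induction ps with
  | nil => exact absurd rfl hps
  | cons p rest ih =>
    cases rest with
    | nil => simp [PySem.Chars.join_singleton]
    | cons q rest' =>
      rw [PySem.Chars.join_cons_cons]
      simp only [List.map_cons, List.flatten_cons] at ih ⊢
      rw [List.append_assoc, List.append_assoc, ih (by simp)]
      simp [List.append_assoc]

lemma join_bar_map {α : Type} (f : α → List Char) (l : List α) (h : l ≠ []) :
    PySem.Chars.join ['|'] (l.map f) ++ ['|'] = (l.map (fun i => f i ++ ['|'])).flatten := by
  rw [join_bar_append _ (by simpa using h), List.map_map]
  rfl

-- A's truncated foldl equals B's join, per inner list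
lemma std_eq (lst : List String) : clfA_std lst = clfB_std lst := by
  apply String.toList_inj.mp
  unfold clfA_std clfB_std
  simp only [PySem.Str.toList_slice, PySem.Str.toList_join, PySem.Str.len_eq,
    PySem.Chars.slice_eq_listSlice]
  rw [clfA_foldl_chars]
  cases lst with
  | nil => simp [PySem.Chars.join_nil, PySem.List.slice]
  | cons x xs =>
    set ps := ((x :: xs).map (fun item => (PySem.Str.replace item "=" "").toList ++ ['|'])).flatten with hps
    have hbar : "|".toList = ['|'] := rfl
    have hnil : ("" : String).toList = [] := rfl
    have hjoin : PySem.Chars.join ['|'] (List.map String.toList ((x :: xs).map (fun item => PySem.Str.replace item "=" ""))) ++ ['|'] = ps := by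
      rw [List.map_map]
      exact join_bar_map (String.toList ∘ fun item => PySem.Str.replace item "=" "") (x :: xs) (by simp)
    have hpos : 0 < ps.length := by
      rw [← hjoin]; simp
    rw [hnil, List.nil_append]
    rw [show ((ps.length : Int) - 1 = ((ps.length - 1 : Nat) : Int)) from by omega]
    rw [PySem.List.slice_to ps (Int.natCast_nonneg _)]
    rw [Int.toNat_natCast, ← List.dropLast_eq_take, hbar, ← hjoin, List.dropLast_concat]

-- A's inner .txt pass is a map
lemma addTxtInner_eq_map (l : List String) : clfA_addTxtInner l = l.map (fun s => s ++ ".txt") := by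
  induction l with
  | nil => rfl
  | cons x xs ih => simp [clfA_addTxtInner, ih]

lemma addTxtOuter_append (a : List (List String)) (r : List String) :
    clfA_addTxtOuter (a ++ [r]) = clfA_addTxtOuter a ++ [clfA_addTxtInner r] := by
  induction a with
  | nil => rfl
  | cons y ys ih => simp [clfA_addTxtOuter, ih]

-- per-row: appending .txt to A's row gives B's row
lemma row_eq (psl : Option (List String)) (lst : List String) :
    clfA_addTxtInner (clfA_row psl lst) = clfB_row psl lst := by
  cases psl with
  | none => simp [clfA_row, clfB_row, addTxtInner_eq_map, std_eq]
  | some ps =>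
    have hfold : ∀ (t : List String),
        ps.foldl (fun t item => t ++ [clfA_std lst ++ "|" ++ item]) t
        = t ++ ps.map (fun item => clfA_std lst ++ "|" ++ item) := by
      intro t
      induction ps generalizing t with
      | nil => simp
      | cons p ps' ihp =>
        rw [List.foldl_cons, ihp]
        simp
    simp only [clfA_row, clfB_row]
    rw [hfold, List.nil_append, addTxtInner_eq_map, List.map_map]
    refine List.map_congr_left (fun item _ => ?_)
    simp [std_eq, String.append_assoc]

-- distribute A's outer pass through A's foldl, turning it into B's foldl
lemma main_eq (fal : List (List String)) (psl : Option (List String)) (acc : List (List String)) :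
    clfA_addTxtOuter (fal.foldl (fun result lst => result ++ [clfA_row psl lst]) acc)
    = fal.foldl (fun result lst => result ++ [clfB_row psl lst]) (clfA_addTxtOuter acc) := by
  induction fal generalizing acc with
  | nil => rfl
  | cons lst rest ih =>
    simp only [List.foldl_cons]
    rw [ih, addTxtOuter_append, row_eq]

-- ===== VERDICT (by name: the statement is the Claim_ definition above) =====
theorem construct_list_files_spec : Claim_equal_construct_list_files := by
  intro fal psl _
  unfold Spec_construct_list_files construct_list_files construct_list_files_alt
  exact main_eq fal psl []
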